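-- pv_equiv track=rewrite | github.com/Lunatik4872/Projet_Rumba_IA | Rumba_IA.py | opPos
-- ===== SOURCE A (Python) =====
-- def trouverDestinations(e,pi) :
--     res = []
--     for i in range(len(e)) :
--         if i != pi and len(e[i]) < 3 : res.append(i)
--     return res
--
-- def deplacer(e,p1,p2) :
--     elt = e[p1].pop(0)
--     e[p2].insert(0,elt)
--     return e
--
-- def opPos(e):
--     res = []
--     for i in range(len(e)):
--         if e[i]:
--             possible = trouverDestinations(e, i)
--             for j in possible:
--                 etat = [pipe[:] for pipe in e]
--                 etat = deplacer(etat, i, j)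
--                 res.append(((i+1, j+1), etat, 1))
--     return res
-- ===== SOURCE B (Python) =====
-- def opPos(e):
--     def open_idx(ps, k):
--         if not ps:
--             return []
--         rest = open_idx(ps[1:], k + 1)
--         return [k] + rest if len(ps[0]) < 3 else rest
--
--     def state(ps, k, i, j, head):
--         if not ps:
--             return []
--         p = ps[0]
--         q = p[1:] if k == i else [head] + p if k == j else p[:]
--         return [q] + state(ps[1:], k + 1, i, j, head)
--
--     def moves_from(i, head, js):
--         if not js:
--             return []
--         rest = moves_from(i, head, js[1:])
--         j = js[0]
--         if j == i:
--             return rest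
--         return [((i + 1, j + 1), state(e, 0, i, j, head), 1)] + rest
--
--     def go(ps, i, ouverts):
--         if not ps:
--             return []
--         here = moves_from(i, ps[0][0], ouverts) if ps[0] else []
--         return here + go(ps[1:], i + 1, ouverts)
--
--     return go(e, 0, open_idx(e, 0))
-- ===== Notes on version B (the rewrite author's own statement) =====
-- stated objective: alternative
-- what changed: Replaces A's index-driven loops and copy-then-mutate (pop/insert on a fresh copy) with a fully recursive cons-based construction: open destinations are collected once by structural recursion instead of rescanning all pipes for every source, each successor state is built in a single recursive surgery pass (tail at the source, pushed head at the destination, plain copy elsewhere), and per-source move lists are concatenated recursively.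
import Mathlib
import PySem

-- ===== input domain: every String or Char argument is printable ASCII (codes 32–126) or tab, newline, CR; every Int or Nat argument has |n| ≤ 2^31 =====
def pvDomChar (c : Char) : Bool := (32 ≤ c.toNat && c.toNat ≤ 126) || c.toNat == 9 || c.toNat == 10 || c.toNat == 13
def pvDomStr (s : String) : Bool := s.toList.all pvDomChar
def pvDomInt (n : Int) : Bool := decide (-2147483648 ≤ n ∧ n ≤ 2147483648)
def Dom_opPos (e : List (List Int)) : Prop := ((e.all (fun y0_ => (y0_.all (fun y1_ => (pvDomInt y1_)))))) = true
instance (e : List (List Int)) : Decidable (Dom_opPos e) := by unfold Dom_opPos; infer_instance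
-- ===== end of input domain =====

-- B replaces A's index loops and copy-then-pop/insert with a fully recursive cons-based
-- construction (open destinations collected once, each successor state built by one recursive
-- surgery pass, open destinations collected once instead of per source); objective: alternative.

-- ===== PORT A =====
-- A's 'for i in range(len(e))' loops are folds over List.range; indices are always in range, so
-- e.getD i [] is exactly Python's e[i] here, and headD 0 is exactly e[p1].pop(0) (caller guarantees nonempty).
def trouverDestinations (e : List (List Int)) (pi : Nat) : List Nat :=
  (List.range e.length).foldl
    (fun res i => if i ≠ pi ∧ (e.getD i []).length < 3 then res ++ [i] else res) []

-- mutation of the fresh copy 'etat', rendered as a value: set p1 to its tail, then push the popped head at p2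
def deplacer (e : List (List Int)) (p1 p2 : Nat) : List (List Int) :=
  let elt := (e.getD p1 []).headD 0
  let e1 := e.set p1 (e.getD p1 []).tail
  e1.set p2 (elt :: e1.getD p2 [])

def opPos (e : List (List Int)) : List ((Int × Int) × List (List Int) × Int) :=
  (List.range e.length).foldl
    (fun res i =>
      if e.getD i [] ≠ [] then
        -- etat = [pipe[:] for pipe in e] copies values, so etat = e as a value
        (trouverDestinations e i).foldl
          (fun res (j : Nat) => res ++ [(((i : Int) + 1, (j : Int) + 1), deplacer e i j, 1)]) res
      else res) []

-- ===== PORT B =====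
-- Source B's open_idx: structural recursion collecting positions of pipes with len < 3
def bOpenIdx : List (List Int) → Nat → List Nat
  | [], _ => []
  | p :: ps, k =>
      let rest := bOpenIdx ps (k + 1)
      if p.length < 3 then k :: rest else rest

-- Source B's state: one recursive surgery pass (tail at i, pushed head at j, copy elsewhere)
def bState : List (List Int) → Nat → Nat → Nat → Int → List (List Int)
  | [], _, _, _, _ => []
  | p :: ps, k, i, j, h =>
      (if k = i then p.tail else if k = j then h :: p else p) :: bState ps (k + 1) i j h

-- Source B's moves_from: recursion over the open-destination list, skipping j == i
def bMovesFrom (e : List (List Int)) (i : Nat) (h : Int) :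
    List Nat → List ((Int × Int) × List (List Int) × Int)
  | [] => []
  | j :: js =>
      let rest := bMovesFrom e i h js
      if j = i then rest
      else (((i : Int) + 1, (j : Int) + 1), bState e 0 i j h, 1) :: rest

-- Source B's go: recursion over the pipes, concatenating each source's move list
def bGo (e : List (List Int)) : List (List Int) → Nat → List Nat →
    List ((Int × Int) × List (List Int) × Int)
  | [], _, _ => []
  | p :: ps, i, ouv =>
      (if p ≠ [] then bMovesFrom e i (p.headD 0) ouv else []) ++ bGo e ps (i + 1) ouv

def opPos_alt (e : List (List Int)) : List ((Int × Int) × List (List Int) × Int) :=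
  bGo e e 0 (bOpenIdx e 0)

-- ===== PRECONDITION & SPEC =====
def Spec_opPos (e : List (List Int)) (out : List ((Int × Int) × List (List Int) × Int)) : Prop := out = opPos_alt e
instance (e : List (List Int)) (out : List ((Int × Int) × List (List Int) × Int)) : Decidable (Spec_opPos e out) := by unfold Spec_opPos; infer_instance

-- ===== CLAIM (what is proved, stated in full; the proofs are below) =====
def Claim_equal_opPos : Prop := ∀ (e : List (List Int)), Dom_opPos e → Spec_opPos e (opPos e)

-- ===== LEMMAS AND PROOFS =====

-- generic loop shape: 'for x in l: if c(x): out += g(x)'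
theorem foldl_ite_flatMap {α β : Type} (c : α → Prop) [DecidablePred c] (g : α → List β) :
    ∀ (l : List α) (acc : List β),
      l.foldl (fun res x => if c x then res ++ g x else res) acc
        = acc ++ l.flatMap (fun x => if c x then g x else []) := by
  intro l
  induction l with
  | nil => intro acc; simp
  | cons x xs ih => intro acc; by_cases h : c x <;> simp [h, ih]

theorem trouver_eq_filter (e : List (List Int)) (pi : Nat) :
    trouverDestinations e pi
      = (List.range e.length).filter (fun j => decide (j ≠ pi ∧ (e.getD j []).length < 3)) := by
  unfold trouverDestinations
  exact (PySem.List.foldl_append_ite_eq_filter _ _ _).trans (List.nil_append _)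

theorem opPos_eq_flatMap (e : List (List Int)) :
    opPos e
      = (List.range e.length).flatMap (fun i =>
          if e.getD i [] ≠ [] then
            (trouverDestinations e i).map
              (fun (j : Nat) => (((i : Int) + 1, (j : Int) + 1), deplacer e i j, 1))
          else []) := by
  unfold opPos
  simp only [PySem.List.foldl_append_singleton_eq_map]
  exact (foldl_ite_flatMap _ _ _ _).trans (List.nil_append _)

theorem deplacer_eq_map (e : List (List Int)) (i j : Nat) (hi : i < e.length)
    (hj : j < e.length) (hij : j ≠ i) :
    deplacer e i j
      = (List.range e.length).map (fun k =>
          if k = i then (e.getD i []).tail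
          else if k = j then (e.getD i []).headD 0 :: e.getD k []
          else e.getD k []) := by
  have g1 : (e.set i (e.getD i []).tail).getD j [] = e.getD j [] := by
    rw [List.getD_eq_getElem _ _ (by simpa using hj), List.getD_eq_getElem _ _ hj,
        List.getElem_set, if_neg (fun h => hij h.symm)]
  apply List.ext_getElem
  · simp [deplacer]
  · intro k h1 h2
    simp only [deplacer, List.getElem_map, List.getElem_range, List.getElem_set]
    have hk : k < e.length := by simpa using h2
    by_cases hki : k = i
    · subst hki
      rw [if_neg (fun h => hij h), if_pos rfl, if_pos rfl]
    · by_cases hkj : k = j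
      · subst hkj
        rw [if_pos rfl, if_neg hki, if_pos rfl, g1, List.getD_eq_getElem _ _ hk]
      · rw [if_neg (fun h => hkj h.symm), if_neg (fun h => hki h.symm),
            if_neg hki, if_neg hkj, List.getD_eq_getElem _ _ hk]

theorem bOpenIdx_eq (ps : List (List Int)) :
    ∀ k, bOpenIdx ps k
      = ((List.range ps.length).filter (fun t => decide ((ps.getD t []).length < 3))).map (· + k) := by
  induction ps with
  | nil => intro k; simp [bOpenIdx]
  | cons p ps ih =>
      intro k
      simp only [bOpenIdx, List.length_cons, List.range_succ_eq_map, List.filter_cons,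
        List.filter_map]
      by_cases h : p.length < 3 <;>
        simp [h, ih (k + 1), List.map_map, Function.comp_def, Nat.add_comm, Nat.add_left_comm] <;>
        rfl

theorem bState_eq (i j : Nat) (h : Int) (ps : List (List Int)) :
    ∀ k, bState ps k i j h
      = (List.range ps.length).map (fun t =>
          if t + k = i then (ps.getD t []).tail
          else if t + k = j then h :: ps.getD t []
          else ps.getD t []) := by
  induction ps with
  | nil => intro k; simp [bState]
  | cons p ps ih =>
      intro k
      simp only [bState, List.length_cons, List.range_succ_eq_map, List.map_cons, List.map_map]
      refine congrArg₂ _ (by simp) ?_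
      rw [ih (k + 1)]
      apply List.map_congr_left
      intro t _
      simp [Nat.add_comm, Nat.add_left_comm]

theorem bMovesFrom_eq (e : List (List Int)) (i : Nat) (h : Int) (js : List Nat) :
    bMovesFrom e i h js
      = (js.filter (fun j => decide (j ≠ i))).map
          (fun (j : Nat) => (((i : Int) + 1, (j : Int) + 1), bState e 0 i j h, 1)) := by
  induction js with
  | nil => simp [bMovesFrom]
  | cons j js ih =>
      by_cases hj : j = i <;> simp [bMovesFrom, hj, ih]

theorem bGo_eq (e : List (List Int)) (ouv : List Nat) (ps : List (List Int)) :
    ∀ i, bGo e ps i ouv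
      = (List.range ps.length).flatMap (fun t =>
          if ps.getD t [] ≠ [] then bMovesFrom e (t + i) ((ps.getD t []).headD 0) ouv else []) := by
  induction ps with
  | nil => intro i; simp [bGo]
  | cons p ps ih =>
      intro i
      simp only [bGo, List.length_cons, List.range_succ_eq_map, List.flatMap_cons,
        List.flatMap_map]
      refine congrArg₂ _ (by simp) ?_
      rw [ih (i + 1)]
      apply List.flatMap_congr
      intro t _
      simp [Nat.add_comm, Nat.add_left_comm]

-- ===== VERDICT (by name: the statement is the Claim_ definition above) =====
theorem opPos_spec : Claim_equal_opPos := by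
  intro e _
  unfold Spec_opPos opPos_alt
  rw [opPos_eq_flatMap, bGo_eq, bOpenIdx_eq]
  simp only [Nat.add_zero, List.map_id']
  apply List.flatMap_congr
  intro i hi
  have hin : i < e.length := List.mem_range.mp hi
  by_cases hc : e.getD i [] ≠ []
  · rw [if_pos hc, if_pos hc, bMovesFrom_eq, trouver_eq_filter, List.filter_filter]
    have hpred : ∀ j ∈ List.range e.length,
        decide (j ≠ i ∧ (e.getD j []).length < 3)
          = (decide (j ≠ i) && decide ((e.getD j []).length < 3)) := by
      intro j _
      by_cases h1 : j = i <;> by_cases h2 : (e.getD j []).length < 3 <;> simp [h1]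
    rw [List.filter_congr hpred]
    apply List.map_congr_left
    intro j hj
    have hjmem := List.mem_filter.mp hj
    have hjn : j < e.length := List.mem_range.mp hjmem.1
    have hji : j ≠ i := by
      simp only [Bool.and_eq_true, decide_eq_true_eq] at hjmem
      exact hjmem.2.1
    rw [deplacer_eq_map e i j hin hjn hji, bState_eq]
    refine congrArg _ (congrArg (fun m => (m, 1)) (List.map_congr_left ?_))
    intro a _
    by_cases h1 : a = i
    · subst h1; simp
    · simp [h1]
  · rw [if_neg hc, if_neg hc]
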